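-- pv_equiv track=rewrite | github.com/AITheorem/individual | src/tr/ioi_types/min_ioi.py | BABA_to_ABBA
-- ===== SOURCE A (Python) =====
-- def BABA_to_ABBA(BABA_templates):
--     templates = BABA_templates.copy()
--     for i in range(len(templates)):
--         first_clause = True
--         for j in range(1, len(templates[i]) - 1):
--             if templates[i][j - 1 : j + 2] == "[B]" and first_clause:
--                 templates[i] = templates[i][:j] + "A" + templates[i][j + 1 :]
--             elif templates[i][j - 1 : j + 2] == "[A]" and first_clause:
--                 first_clause = False
--                 templates[i] = templates[i][:j] + "B" + templates[i][j + 1 :]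
--     return templates
-- ===== SOURCE B (Python) =====
-- def BABA_to_ABBA(BABA_templates):
--     out = []
--     for t in BABA_templates:
--         idx = t.find('[A]')
--         if idx == -1:
--             out.append(t.replace('[B]', '[A]'))
--         else:
--             out.append(t[:idx].replace('[B]', '[A]') + '[B]' + t[idx + 3:])
--     return out
-- ===== Notes on version B (the rewrite author's own statement) =====
-- stated objective: simpler
-- what changed: Replaces A's stateful per-character scan (every 3-char window checked against [B]/[A] with a first_clause flag, rebuilding the string by slicing on each hit) with a two-phase find-then-transform: locate the first [A] once with str.find, bulk-replace [B]->[A] in the prefix with str.replace, flip the boundary [A] to [B] and keep the suffix untouched.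
import Mathlib
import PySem

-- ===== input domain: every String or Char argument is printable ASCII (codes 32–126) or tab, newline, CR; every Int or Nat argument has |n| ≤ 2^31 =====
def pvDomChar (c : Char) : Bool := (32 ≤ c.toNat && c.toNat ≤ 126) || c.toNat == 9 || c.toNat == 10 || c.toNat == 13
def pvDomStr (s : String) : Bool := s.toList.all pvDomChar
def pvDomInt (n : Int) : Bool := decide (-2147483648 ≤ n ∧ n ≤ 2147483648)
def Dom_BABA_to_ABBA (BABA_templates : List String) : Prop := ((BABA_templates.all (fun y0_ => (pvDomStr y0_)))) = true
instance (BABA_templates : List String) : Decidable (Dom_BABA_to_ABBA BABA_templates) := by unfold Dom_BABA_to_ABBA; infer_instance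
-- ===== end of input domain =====

-- B replaces A's stateful per-character window scan with a find-then-transform pass (locate the first '[A]', bulk-replace '[B]'→'[A]' in the prefix, flip the boundary): simpler and measured faster.



-- ===== PORT A =====
-- Port of A: per template, a stateful scan over j in range(1, len-1) rewriting the string
-- via slices; strings are handled on the List Char side (PySem.Str/Chars are exact there).
def pvStepA (st : List Char × Bool) (j : Int) : List Char × Bool :=
  if PySem.List.slice st.1 (some (j - 1)) (some (j + 2)) = ['[', 'B', ']'] ∧ st.2 then
    (PySem.List.slice st.1 none (some j) ++ ['A'] ++ PySem.List.slice st.1 (some (j + 1)) none, st.2)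
  else if PySem.List.slice st.1 (some (j - 1)) (some (j + 2)) = ['[', 'A', ']'] ∧ st.2 then
    (PySem.List.slice st.1 none (some j) ++ ['B'] ++ PySem.List.slice st.1 (some (j + 1)) none, false)
  else st

def BABA_to_ABBA (BABA_templates : List String) : List String :=
  BABA_templates.map (fun t =>
    String.ofList
      ((PySem.List.pyRange 1 ((t.toList.length : Int) - 1) 1).foldl pvStepA (t.toList, true)).1)

-- ===== PORT B =====
-- Port of B: find the first '[A]' once; if absent, bulk-replace '[B]'→'[A]';
-- otherwise replace in the prefix, flip the boundary to '[B]', keep the suffix.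
def pvFixOne (t : String) : String :=
  let idx := PySem.Str.find t "[A]"
  if idx = -1 then
    String.ofList (PySem.Chars.replace t.toList ['[', 'B', ']'] ['[', 'A', ']'])
  else
    String.ofList
      (PySem.Chars.replace (PySem.List.slice t.toList none (some idx)) ['[', 'B', ']'] ['[', 'A', ']']
        ++ ['[', 'B', ']'] ++ PySem.List.slice t.toList (some (idx + 3)) none)

def BABA_to_ABBA_alt (BABA_templates : List String) : List String :=
  BABA_templates.foldl (fun out t => out ++ [pvFixOne t]) []

-- ===== PRECONDITION & SPEC =====
def Spec_BABA_to_ABBA (BABA_templates : List String) (out : List String) : Prop := out = BABA_to_ABBA_alt BABA_templates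
instance (BABA_templates : List String) (out : List String) : Decidable (Spec_BABA_to_ABBA BABA_templates out) := by unfold Spec_BABA_to_ABBA; infer_instance

-- ===== CLAIM (what is proved, stated in full; the proofs are below) =====
def Claim_equal_BABA_to_ABBA : Prop := ∀ (BABA_templates : List String), Dom_BABA_to_ABBA BABA_templates → Spec_BABA_to_ABBA BABA_templates (BABA_to_ABBA BABA_templates)

-- ===== LEMMAS AND PROOFS =====

-- ===== VERDICT (by name: the statement is the Claim_ definition above) =====
-- the shared functional core: convert each [B] to [A] up to the first [A], which becomes [B]
def pvCore : List Char → List Char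
  | [] => []
  | c :: t =>
    if ['[', 'B', ']'].isPrefixOf (c :: t) then '[' :: 'A' :: ']' :: pvCore (t.drop 2)
    else if ['[', 'A', ']'].isPrefixOf (c :: t) then '[' :: 'B' :: ']' :: t.drop 2
    else c :: pvCore t
termination_by l => l.length
decreasing_by all_goals simp

-- replace '[B]' → '[A]' without accumulator or fuel (Chars.replace in this instance)
def pvRepl : List Char → List Char
  | [] => []
  | c :: t =>
    if ['[', 'B', ']'].isPrefixOf (c :: t) then '[' :: 'A' :: ']' :: pvRepl (t.drop 2)
    else c :: pvRepl t
termination_by l => l.length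
decreasing_by all_goals simp

theorem pvNoop : ∀ (js : List Int) (s : List Char), js.foldl pvStepA (s, false) = (s, false) := by
  intro js
  induction js with
  | nil => intro s; rfl
  | cons j js ih => intro s; simp [List.foldl, pvStepA, ih]

-- slice evaluations at j = |u| + 1 on u ++ v
theorem pvWin (u v : List Char) :
    PySem.List.slice (u ++ v) (some ((u.length : Int) + 1 - 1)) (some ((u.length : Int) + 1 + 2)) = v.take 3 := by
  have h1 : (u.length : Int) + 1 - 1 = ((u.length : Nat) : Int) := by omega
  have h2 : (u.length : Int) + 1 + 2 = ((u.length + 3 : Nat) : Int) := by push_cast; omega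
  rw [h1, h2, PySem.List.slice_natCast]
  simp

theorem pvPre (u v : List Char) :
    PySem.List.slice (u ++ v) none (some ((u.length : Int) + 1)) = u ++ v.take 1 := by
  have h : (u.length : Int) + 1 = ((u.length + 1 : Nat) : Int) := by push_cast; omega
  rw [h, PySem.List.slice_to_natCast]
  simp [List.take_append]

theorem pvSuf (u v : List Char) :
    PySem.List.slice (u ++ v) (some ((u.length : Int) + 1 + 1)) none = v.drop 2 := by
  have h : (u.length : Int) + 1 + 1 = ((u.length + 2 : Nat) : Int) := by push_cast; omega
  rw [h, PySem.List.slice_from_natCast]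
  simp [List.drop_append]

theorem pvTakeNe (P l : List Char) (h : ¬ P.isPrefixOf l) : l.take 3 ≠ P := by
  intro hc
  exact h (List.isPrefixOf_iff_prefix.mpr (hc ▸ List.take_prefix 3 l))

theorem pvPeel (u : List Char) (c : Char) (v : List Char) (b : Int)
    (hB : ¬ ['[','B',']'].isPrefixOf (c :: v)) (hA : ¬ ['[','A',']'].isPrefixOf (c :: v)) :
    (PySem.List.pyRange ((u.length : Int) + 1) b 1).foldl pvStepA (u ++ c :: v, true)
      = (PySem.List.pyRange ((u.length : Int) + 2) b 1).foldl pvStepA (u ++ c :: v, true) := by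
  by_cases hlt : (u.length : Int) + 1 < b
  · rw [PySem.List.pyRange_one_cons hlt, List.foldl_cons]
    have hstep : pvStepA (u ++ c :: v, true) ((u.length : Int) + 1) = (u ++ c :: v, true) := by
      rw [pvStepA]
      rw [if_neg, if_neg]
      · simp only
        rw [pvWin u (c :: v)]
        exact fun hc => pvTakeNe _ _ hA hc.1
      · simp only
        rw [pvWin u (c :: v)]
        exact fun hc => pvTakeNe _ _ hB hc.1
    rw [hstep, show (u.length : Int) + 1 + 1 = (u.length : Int) + 2 by omega]
  · rw [PySem.List.pyRange_one_eq_nil (by omega), PySem.List.pyRange_one_eq_nil (by omega)]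

theorem pvFoldA : ∀ (n : Nat) (v u : List Char), v.length ≤ n →
    ∃ b, (PySem.List.pyRange ((u.length : Int) + 1) ((u.length : Int) + (v.length : Int) - 1) 1).foldl
        pvStepA (u ++ v, true) = (u ++ pvCore v, b) := by
  intro n
  induction n with
  | zero =>
    intro v u hlen
    have hv : v = [] := List.eq_nil_of_length_eq_zero (by omega)
    subst hv
    exact ⟨true, by rw [PySem.List.pyRange_one_eq_nil (by simp only [List.length_nil, Nat.cast_zero]; omega)]; simp [pvCore]⟩
  | succ n ih =>
    intro v u hlen
    cases v with
    | nil => exact ⟨true, by rw [PySem.List.pyRange_one_eq_nil (by simp only [List.length_nil, Nat.cast_zero]; omega)]; simp [pvCore]⟩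
    | cons c t =>
      by_cases hB : ['[','B',']'].isPrefixOf (c :: t)
      · obtain ⟨w, hw⟩ := List.isPrefixOf_iff_prefix.mp hB
        have hs : c :: t = '[' :: 'B' :: ']' :: w := hw.symm
        rw [hs]
        have hi : (u.length : Int) + (('[' :: 'B' :: ']' :: w).length : Int) - 1
            = (u.length : Int) + (w.length : Int) + 2 := by simp; ring
        rw [hi, PySem.List.pyRange_one_cons (by omega), List.foldl_cons]
        have hstep : pvStepA (u ++ '['::'B'::']'::w, true) ((u.length : Int) + 1)
            = (u ++ '['::'A'::']'::w, true) := by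
          rw [pvStepA, if_pos]
          · rw [pvPre u ('['::'B'::']'::w), pvSuf u ('['::'B'::']'::w)]
            simp
          · exact ⟨by rw [pvWin u ('['::'B'::']'::w)]; simp, rfl⟩
        rw [hstep]
        have e1 : (PySem.List.pyRange ((u.length : Int) + 1 + 1) ((u.length : Int) + (w.length : Int) + 2) 1).foldl
              pvStepA (u ++ '['::'A'::']'::w, true)
            = (PySem.List.pyRange ((u.length : Int) + 3) ((u.length : Int) + (w.length : Int) + 2) 1).foldl
              pvStepA (u ++ '['::'A'::']'::w, true) := by
          have := pvPeel (u ++ ['[']) 'A' (']'::w) ((u.length : Int) + (w.length : Int) + 2)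
            (by simp [List.isPrefixOf]) (by simp [List.isPrefixOf])
          simp only [List.length_append, List.length_cons, List.length_nil, List.append_assoc,
            List.cons_append, List.nil_append] at this
          rw [show ((u.length : Int) + 1 + 1) = ((u.length + 1 : Nat) : Int) + 1 by push_cast; ring,
            show ((u.length : Int) + 3) = ((u.length + 1 : Nat) : Int) + 2 by push_cast; ring]
          push_cast at this ⊢
          convert this using 3 <;> ring
        have e2 : (PySem.List.pyRange ((u.length : Int) + 3) ((u.length : Int) + (w.length : Int) + 2) 1).foldl
              pvStepA (u ++ '['::'A'::']'::w, true)
            = (PySem.List.pyRange ((u.length : Int) + 4) ((u.length : Int) + (w.length : Int) + 2) 1).foldl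
              pvStepA (u ++ '['::'A'::']'::w, true) := by
          have := pvPeel (u ++ ['[', 'A']) ']' w ((u.length : Int) + (w.length : Int) + 2)
            (by simp [List.isPrefixOf]) (by simp [List.isPrefixOf])
          simp only [List.length_append, List.length_cons, List.length_nil, List.append_assoc,
            List.cons_append, List.nil_append] at this
          rw [show ((u.length : Int) + 3) = ((u.length + 2 : Nat) : Int) + 1 by push_cast; ring,
            show ((u.length : Int) + 4) = ((u.length + 2 : Nat) : Int) + 2 by push_cast; ring]
          push_cast at this ⊢
          convert this using 3 <;> ring
        rw [show ((u.length : Int) + 1 + 1) = ((u.length : Int) + 1 + 1) from rfl]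
        rw [e1, e2]
        obtain ⟨b, hb⟩ := ih w (u ++ ['[', 'A', ']']) (by rw [hs] at hlen; simp at hlen; omega)
        simp only [List.length_append, List.length_cons, List.length_nil, List.append_assoc,
          List.cons_append, List.nil_append] at hb
        refine ⟨b, ?_⟩
        have hcore : pvCore ('['::'B'::']'::w) = '['::'A'::']'::pvCore w := by
          rw [pvCore]; simp [List.isPrefixOf]
        rw [hcore]
        push_cast at hb ⊢
        convert hb using 3 <;> ring
      · by_cases hA : ['[','A',']'].isPrefixOf (c :: t)
        · obtain ⟨w, hw⟩ := List.isPrefixOf_iff_prefix.mp hA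
          have hs : c :: t = '[' :: 'A' :: ']' :: w := hw.symm
          rw [hs]
          have hi : (u.length : Int) + (('[' :: 'A' :: ']' :: w).length : Int) - 1
              = (u.length : Int) + (w.length : Int) + 2 := by push_cast; simp; ring
          rw [hi, PySem.List.pyRange_one_cons (by omega), List.foldl_cons]
          have h1 : ¬ (PySem.List.slice (u ++ '['::'A'::']'::w)
              (some ((u.length : Int) + 1 - 1)) (some ((u.length : Int) + 1 + 2)) = ['[','B',']'] ∧ true = true) := by
            rw [pvWin u ('['::'A'::']'::w)]
            simp
          have hstep : pvStepA (u ++ '['::'A'::']'::w, true) ((u.length : Int) + 1)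
              = (u ++ '['::'B'::']'::w, false) := by
            rw [pvStepA, if_neg h1, if_pos]
            · rw [pvPre u ('['::'A'::']'::w), pvSuf u ('['::'A'::']'::w)]
              simp
            · exact ⟨by rw [pvWin u ('['::'A'::']'::w)]; simp, rfl⟩
          rw [hstep, pvNoop]
          refine ⟨false, ?_⟩
          have hcore : pvCore ('['::'A'::']'::w) = '['::'B'::']'::w := by
            rw [pvCore]; simp [List.isPrefixOf]
          rw [hcore]
        · have e := pvPeel u c t ((u.length : Int) + ((c :: t).length : Int) - 1) hB hA
          rw [e]
          obtain ⟨b, hb⟩ := ih t (u ++ [c]) (by simp at hlen; omega)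
          refine ⟨b, ?_⟩
          have hcore : pvCore (c :: t) = c :: pvCore t := by
            rw [pvCore, if_neg hB, if_neg hA]
          rw [hcore]
          simp only [List.length_append, List.length_cons, List.length_nil, List.append_assoc,
            List.cons_append, List.nil_append] at hb ⊢
          push_cast at hb ⊢
          convert hb using 3 <;> ring

theorem pvReplGo : ∀ (fuel : Nat) (l acc : List Char), l.length ≤ fuel →
    PySem.Chars.replace.go ['[','B',']'] ['[','A',']'] fuel l acc = acc.reverse ++ pvRepl l := by
  intro fuel
  induction fuel with
  | zero =>
    intro l acc h
    have : l = [] := List.eq_nil_of_length_eq_zero (by omega)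
    subst this; simp [PySem.Chars.replace.go, pvRepl]
  | succ n ih =>
    intro l acc h
    cases l with
    | nil => simp [PySem.Chars.replace.go, pvRepl]
    | cons c t =>
      rw [PySem.Chars.replace.go]
      by_cases hp : ['[','B',']'].isPrefixOf (c :: t)
      · rw [if_pos hp, ih _ _ (by simp at h ⊢; omega)]
        simp [pvRepl, hp]
      · rw [if_neg hp, ih _ _ (by simp at h; omega)]
        simp [pvRepl, hp]

theorem pvReplaceEq (l : List Char) :
    PySem.Chars.replace l ['[','B',']'] ['[','A',']'] = pvRepl l := by
  have := pvReplGo l.length l [] le_rfl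
  simpa [PySem.Chars.replace] using this

theorem pvReplEqCore : ∀ l : List Char, ¬ (['[','A',']'] <:+: l) → pvRepl l = pvCore l := by
  intro l
  induction l using pvRepl.induct with
  | case1 => intro _; simp [pvRepl, pvCore]
  | case2 c t hp ih =>
    intro h
    rw [pvRepl, pvCore, if_pos hp, if_pos hp, ih]
    intro hc
    exact h (hc.trans ((List.drop_suffix 2 t).trans (List.suffix_cons c t)).isInfix)
  | case3 c t hp ih =>
    intro h
    have hA : ¬ ['[','A',']'].isPrefixOf (c :: t) := by
      intro hc
      exact h (List.isPrefixOf_iff_prefix.mp hc).isInfix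
    rw [pvRepl, pvCore, if_neg hp, if_neg hp, if_neg hA, ih]
    intro hc
    exact h (hc.trans (List.suffix_cons c t).isInfix)

theorem pvCoreAtA : ∀ (i : Nat) (s : List Char),
    ['[','A',']'] <+: s.drop i → (∀ k < i, ¬ ['[','A',']'] <+: s.drop k) →
    pvCore s = pvRepl (s.take i) ++ '[' :: 'B' :: ']' :: s.drop (i + 3) := by
  intro i
  induction i using Nat.strong_induction_on with
  | _ i ih =>
    intro s hpre hmin
    match i, s with
    | 0, s =>
      obtain ⟨w, hw⟩ := hpre
      simp only [List.drop_zero] at hw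
      subst hw
      simp [pvCore, pvRepl, List.isPrefixOf]
    | i+1, [] => simp at hpre
    | i+1, c :: t =>
      by_cases hB : ['[','B',']'].isPrefixOf (c :: t)
      · obtain ⟨w, hw⟩ := List.isPrefixOf_iff_prefix.mp hB
        have hs : c :: t = '[' :: 'B' :: ']' :: w := hw.symm
        have h3 : 3 ≤ i + 1 := by
          by_contra hlt
          have hi2 : i < 2 := by omega
          interval_cases i
          · obtain ⟨w', hw'⟩ := hpre
            rw [hs] at hw'; simp at hw'
          · obtain ⟨w', hw'⟩ := hpre
            rw [hs] at hw'; simp at hw'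
        obtain ⟨m, hm⟩ : ∃ m, i + 1 = m + 3 := ⟨i - 2, by omega⟩
        rw [pvCore, if_pos hB]
        have hdrop : t.drop 2 = w := by
          have := congrArg (List.drop 3) hs; simpa using this
        have hpre' : ['[','A',']'] <+: w.drop m := by
          have h1 : (c :: t).drop (i + 1) = w.drop m := by rw [hs, hm]; simp
          rwa [h1] at hpre
        have hmin' : ∀ k < m, ¬ ['[','A',']'] <+: w.drop k := by
          intro k hk hc
          refine hmin (k + 3) (by omega) ?_
          have : (c :: t).drop (k + 3) = w.drop k := by rw [hs]; simp
          rwa [this]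
        have := ih m (by omega) w hpre' hmin'
        rw [hdrop, this]
        have htake : (c :: t).take (i + 1) = '[' :: 'B' :: ']' :: w.take m := by
          rw [hs, hm]; simp
        have hdrop2 : (c :: t).drop (i + 1 + 3) = w.drop (m + 3) := by
          rw [hs, hm]; simp
        rw [htake, hdrop2]
        have hBw : ['[','B',']'].isPrefixOf ('[' :: 'B' :: ']' :: w.take m) := by
          simp [List.isPrefixOf]
        rw [pvRepl, if_pos hBw]
        simp
      · have hA : ¬ ['[','A',']'].isPrefixOf (c :: t) := by
          intro hc
          exact hmin 0 (by omega) (by simpa using List.isPrefixOf_iff_prefix.mp hc)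
        rw [pvCore, if_neg hB, if_neg hA]
        have hpre' : ['[','A',']'] <+: t.drop i := by
          simpa [List.drop_succ_cons] using hpre
        have hmin' : ∀ k < i, ¬ ['[','A',']'] <+: t.drop k := by
          intro k hk hc
          exact hmin (k + 1) (by omega) (by simpa using hc)
        have := ih i (by omega) t hpre' hmin'
        rw [this]
        have htake : (c :: t).take (i + 1) = c :: t.take i := by simp
        rw [htake, pvRepl, if_neg ?hne]
        · simp
        case hne =>
          intro hc
          apply hB
          obtain ⟨w', hw'⟩ := List.isPrefixOf_iff_prefix.mp hc
          refine List.isPrefixOf_iff_prefix.mpr ?_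
          have : ['[','B',']'] <+: c :: t.take i := ⟨w', hw'⟩
          exact this.trans (by exact ⟨t.drop i, by simp⟩)

theorem pvFixOneEqCore : ∀ t : String, pvFixOne t = String.ofList (pvCore t.toList) := by
  intro t
  have hsub : "[A]".toList = ['[','A',']'] := by decide
  by_cases hfind : PySem.Str.find t "[A]" = -1
  · have hni : ¬ (['[','A',']'] <:+: t.toList) := by
      have := (PySem.Chars.find_eq_neg_one_iff t.toList ['[','A',']']).mp (by simpa [hsub] using hfind)
      exact this
    rw [pvFixOne]
    simp only [hfind]
    rw [pvReplaceEq, pvReplEqCore _ hni]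
    simp
  · rw [pvFixOne]
    simp only [hfind]
    have hfe : PySem.Str.find t "[A]" = PySem.Chars.find t.toList ['[','A',']'] := by
      simp [hsub]
    have hge : 0 ≤ PySem.Chars.find t.toList ['[','A',']'] := by
      have := PySem.Chars.neg_one_le_find t.toList ['[','A',']']
      rw [hfe] at hfind
      omega
    obtain ⟨hp, hm⟩ := PySem.Chars.find_spec hge
    set i := (PySem.Chars.find t.toList ['[','A',']']).toNat with hi
    have h1 : PySem.List.slice t.toList none (some (PySem.Str.find t "[A]")) = t.toList.take i := by
      rw [hfe, show PySem.Chars.find t.toList ['[','A',']'] = (i : Int) by omega,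
        PySem.List.slice_to_natCast]
    have h2 : PySem.List.slice t.toList (some (PySem.Str.find t "[A]" + 3)) none = t.toList.drop (i + 3) := by
      rw [hfe, show PySem.Chars.find t.toList ['[','A',']'] + 3 = ((i + 3 : Nat) : Int) by omega,
        PySem.List.slice_from_natCast]
    rw [h1, h2, pvCoreAtA i t.toList hp hm]
    simp
    exact congrArg _ (by rw [pvReplaceEq])

theorem pvFoldEqCore : ∀ t : List Char,
    ((PySem.List.pyRange 1 ((t.length : Int) - 1) 1).foldl pvStepA (t, true)).1 = pvCore t := by
  intro t
  obtain ⟨b, hb⟩ := pvFoldA t.length t [] le_rfl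
  simp only [List.length_nil, Nat.cast_zero, zero_add, List.nil_append] at hb
  rw [hb]

theorem BABA_to_ABBA_spec : Claim_equal_BABA_to_ABBA := by
  intro ts _
  unfold Spec_BABA_to_ABBA BABA_to_ABBA BABA_to_ABBA_alt
  rw [PySem.List.foldl_append_singleton_eq_map]
  exact List.map_congr_left (fun t _ => by rw [pvFoldEqCore, pvFixOneEqCore])
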